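-- pv_equiv track=rewrite | github.com/CandeGodoy/prog | programacion/resoluciones/parcialfoto 22.py | espandigital
-- ===== SOURCE A (Python) =====
-- def espandigital(n):
--     num = str(n)
--
--     listaNum=[str(i) for i in range(0,10)]
--
--     valor=True
--     for f in listaNum:
--         if f not in num:
--             valor=False
--
--     return valor
-- ===== SOURCE B (Python) =====
-- def espandigital(n):
--     m = abs(n)
--     mask = 0
--     while m:
--         mask |= 1 << (m % 10)
--         m //= 10
--     return mask == 1023
-- ===== Notes on version B (the rewrite author's own statement) =====
-- stated objective: alternative
-- what changed: B never builds or scans any string: it extracts the decimal digits of abs(n) arithmetically with % 10 and // 10, accumulates a 10-bit presence mask, and tests mask == 1023, replacing A's construction of str(n) plus ten substring-membership scans with an accumulator flag.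
import Mathlib
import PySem

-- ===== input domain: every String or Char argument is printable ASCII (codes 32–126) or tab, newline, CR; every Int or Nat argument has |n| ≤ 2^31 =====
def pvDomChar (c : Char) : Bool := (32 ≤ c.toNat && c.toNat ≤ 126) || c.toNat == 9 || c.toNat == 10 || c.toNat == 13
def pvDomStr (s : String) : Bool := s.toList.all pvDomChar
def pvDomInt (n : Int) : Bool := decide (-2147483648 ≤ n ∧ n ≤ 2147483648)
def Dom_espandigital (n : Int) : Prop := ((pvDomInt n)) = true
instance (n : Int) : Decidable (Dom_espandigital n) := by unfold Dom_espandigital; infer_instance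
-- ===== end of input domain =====

-- B replaces A's string construction and per-digit substring scans by pure arithmetic:
-- it extracts the decimal digits of |n| with % and // and accumulates a 10-bit presence mask.

-- ===== PORT A =====
-- Literal port of A: num = str(n); listaNum = [str(i) for i in range(0,10)];
-- valor = True; for f in listaNum: if f not in num: valor = False; return valor
def espandigital (n : Int) : Bool :=
  let num := PySem.Int.toStr n
  let listaNum := (PySem.List.pyRange 0 10 1).map PySem.Int.toStr
  listaNum.foldl (fun valor f => if ¬ (PySem.Str.isIn f num = true) then false else valor) true

-- ===== PORT B =====
-- Literal port of B's while loop: while m: mask |= 1 << (m % 10); m //= 10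
def pvMaskLoop (m mask : Nat) : Nat :=
  if m = 0 then mask else pvMaskLoop (m / 10) (mask ||| (1 <<< (m % 10)))
termination_by m
decreasing_by exact Nat.div_lt_self (Nat.pos_of_ne_zero (by assumption)) (by omega)

-- m = abs(n); mask as above; return mask == 1023
def espandigital_alt (n : Int) : Bool :=
  pvMaskLoop n.natAbs 0 == 1023

-- ===== PRECONDITION & SPEC =====
def Spec_espandigital (n : Int) (out : Bool) : Prop := out = espandigital_alt n
instance (n : Int) (out : Bool) : Decidable (Spec_espandigital n out) := by unfold Spec_espandigital; infer_instance

-- ===== CLAIM (what is proved, stated in full; the proofs are below) =====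
def Claim_equal_espandigital : Prop := ∀ (n : Int), Dom_espandigital n → Spec_espandigital n (espandigital n)

-- ===== LEMMAS AND PROOFS =====

-- 'f in num' for a single-character string f is exactly character membership
theorem isIn_singleton (c : Char) (s : List Char) : PySem.Chars.isIn [c] s = decide (c ∈ s) := by
  by_cases hc : c ∈ s
  · simp only [hc, decide_true]
    rw [PySem.Chars.isIn_iff_infix]
    obtain ⟨l1, l2, rfl⟩ := List.append_of_mem hc
    exact ⟨l1, l2, by simp⟩
  · simp only [hc, decide_false]
    rw [PySem.Chars.isIn_eq_false_iff]
    intro hinf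
    exact hc (hinf.mem (List.mem_singleton_self c))

theorem rangemap_digits :
    (PySem.List.pyRange 0 10 1).map PySem.Int.toStr
      = ["0","1","2","3","4","5","6","7","8","9"] := by decide

-- toDigitsCore equation lemmas
theorem tdc_succ0 (f n : Nat) (l : List Char) (h : n / 10 = 0) :
    Nat.toDigitsCore 10 (f + 1) n l = Nat.digitChar (n % 10) :: l := by
  simp only [Nat.toDigitsCore, h, if_true]

theorem tdc_succ (f n : Nat) (l : List Char) (h : n / 10 ≠ 0) :
    Nat.toDigitsCore 10 (f + 1) n l = Nat.toDigitsCore 10 f (n / 10) (Nat.digitChar (n % 10) :: l) := by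
  simp only [Nat.toDigitsCore, h, if_false]

-- toDigitsCore accumulates on the right
theorem tdc_append (f : Nat) : ∀ (n : Nat) (l : List Char),
    Nat.toDigitsCore 10 f n l = Nat.toDigitsCore 10 f n [] ++ l := by
  induction f with
  | zero => intro n l; simp [Nat.toDigitsCore]
  | succ f ih =>
    intro n l
    by_cases h : n / 10 = 0
    · rw [tdc_succ0 f n l h, tdc_succ0 f n [] h]; simp
    · rw [tdc_succ f n l h, tdc_succ f n [] h,
        ih (n / 10) (Nat.digitChar (n % 10) :: l), ih (n / 10) [Nat.digitChar (n % 10)]]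
      simp

-- fuel irrelevance of toDigitsCore once the fuel exceeds the number
theorem tdc_fuel (n : Nat) : ∀ (f f' : Nat), n < f → n < f' →
    Nat.toDigitsCore 10 f n [] = Nat.toDigitsCore 10 f' n [] := by
  induction n using Nat.strong_induction_on with
  | _ n ih =>
    intro f f' hf hf'
    obtain ⟨g, rfl⟩ : ∃ g, f = g + 1 := ⟨f - 1, by omega⟩
    obtain ⟨g', rfl⟩ : ∃ g', f' = g' + 1 := ⟨f' - 1, by omega⟩
    by_cases h : n / 10 = 0
    · rw [tdc_succ0 g n [] h, tdc_succ0 g' n [] h]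
    · have hn : 0 < n := by
        rcases Nat.eq_zero_or_pos n with h0 | h0
        · exact absurd (by simp [h0]) h
        · exact h0
      have hlt : n / 10 < n := Nat.div_lt_self hn (by omega)
      rw [tdc_succ g n [] h, tdc_succ g' n [] h, tdc_append g, tdc_append g',
        ih (n / 10) hlt g g' (by omega) (by omega)]

theorem toDigits_small {m : Nat} (h2 : m < 10) :
    Nat.toDigits 10 m = [Nat.digitChar m] := by
  unfold Nat.toDigits
  rw [tdc_succ0 m m [] (Nat.div_eq_of_lt h2), Nat.mod_eq_of_lt h2]

theorem toDigits_step {m : Nat} (h : 10 ≤ m) :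
    Nat.toDigits 10 m = Nat.toDigits 10 (m / 10) ++ [Nat.digitChar (m % 10)] := by
  have hdiv : m / 10 ≠ 0 := by
    intro h0
    have : 1 ≤ m / 10 := (Nat.one_le_div_iff (by omega)).2 h
    omega
  have hlt : m / 10 < m := Nat.div_lt_self (by omega) (by omega)
  calc Nat.toDigits 10 m
      = Nat.toDigitsCore 10 (m + 1) m [] := rfl
    _ = Nat.toDigitsCore 10 m (m / 10) [Nat.digitChar (m % 10)] := tdc_succ m m [] hdiv
    _ = Nat.toDigitsCore 10 m (m / 10) [] ++ [Nat.digitChar (m % 10)] :=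
        tdc_append m (m / 10) [Nat.digitChar (m % 10)]
    _ = Nat.toDigitsCore 10 (m / 10 + 1) (m / 10) [] ++ [Nat.digitChar (m % 10)] := by
        rw [tdc_fuel (m / 10) m (m / 10 + 1) hlt (by omega)]
    _ = Nat.toDigits 10 (m / 10) ++ [Nat.digitChar (m % 10)] := rfl

-- pvMaskLoop equation lemmas (pvMaskLoop is well-founded recursion; unfold via these)
theorem maskLoop_zero (mask : Nat) : pvMaskLoop 0 mask = mask := by
  rw [pvMaskLoop]; rfl

theorem maskLoop_succ (m mask : Nat) (h : m ≠ 0) :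
    pvMaskLoop m mask = pvMaskLoop (m / 10) (mask ||| (1 <<< (m % 10))) := by
  conv_lhs => rw [pvMaskLoop]
  rw [if_neg h]

-- the mask accumulator factors through |||
theorem maskLoop_acc (m : Nat) : ∀ (mask : Nat), pvMaskLoop m mask = pvMaskLoop m 0 ||| mask := by
  induction m using Nat.strong_induction_on with
  | _ m ih =>
    intro mask
    by_cases h : m = 0
    · subst h; rw [maskLoop_zero, maskLoop_zero]; simp
    · have hlt : m / 10 < m := Nat.div_lt_self (Nat.pos_of_ne_zero h) (by omega)
      rw [maskLoop_succ m mask h, maskLoop_succ m 0 h,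
        ih (m / 10) hlt (mask ||| 1 <<< (m % 10)), ih (m / 10) hlt (0 ||| 1 <<< (m % 10))]
      simp [Nat.or_comm, Nat.or_left_comm]

theorem maskLoop_lt (m : Nat) : pvMaskLoop m 0 < 1024 := by
  induction m using Nat.strong_induction_on with
  | _ m ih =>
    by_cases h : m = 0
    · subst h; rw [maskLoop_zero]; omega
    · have hlt : m / 10 < m := Nat.div_lt_self (Nat.pos_of_ne_zero h) (by omega)
      rw [maskLoop_succ m 0 h, maskLoop_acc (m / 10)]
      have h1 : pvMaskLoop (m / 10) 0 < 2 ^ 10 := ih (m / 10) hlt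
      have h2 : (0 ||| 1 <<< (m % 10)) < 2 ^ 10 := by
        have hm10 : m % 10 < 10 := Nat.mod_lt _ (by omega)
        rw [Nat.zero_or, Nat.one_shiftLeft]
        exact Nat.pow_lt_pow_right (by omega) hm10
      exact lt_of_lt_of_eq (Nat.or_lt_two_pow h1 h2) (by norm_num)

theorem digitChar_inj : ∀ d < 10, ∀ e < 10, (Nat.digitChar d = Nat.digitChar e ↔ d = e) := by decide

-- digit-membership in the decimal string equals the corresponding mask bit
theorem memBit (m : Nat) (hm : 0 < m) : ∀ d, d < 10 →
    (Nat.digitChar d ∈ Nat.toDigits 10 m ↔ (pvMaskLoop m 0).testBit d) := by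
  induction m using Nat.strong_induction_on with
  | _ m ih =>
    intro d hd
    rw [maskLoop_succ m 0 (by omega), maskLoop_acc (m / 10)]
    have hmod : m % 10 < 10 := Nat.mod_lt _ (by omega)
    by_cases h10 : m < 10
    · have hdiv : m / 10 = 0 := Nat.div_eq_of_lt h10
      have hmodm : m % 10 = m := Nat.mod_eq_of_lt h10
      rw [toDigits_small h10, hdiv, hmodm, maskLoop_zero]
      simp only [Nat.zero_or, Nat.one_shiftLeft, List.mem_singleton]
      rw [Nat.testBit_two_pow, digitChar_inj d hd m h10]
      simp [eq_comm]
    · have h10 : 10 ≤ m := by omega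
      have hdivpos : 0 < m / 10 := (Nat.one_le_div_iff (by omega)).2 h10
      have hlt : m / 10 < m := Nat.div_lt_self (by omega) (by omega)
      rw [toDigits_step h10, List.mem_append, List.mem_singleton,
        ih (m / 10) hlt hdivpos d hd, Nat.zero_or, Nat.testBit_or]
      rw [digitChar_inj d hd (m % 10) hmod]
      simp only [Nat.one_shiftLeft, Nat.testBit_two_pow, Bool.or_eq_true, decide_eq_true_eq]
      exact or_congr Iff.rfl eq_comm

-- the accumulator fold over ten bits equals the full-mask test (checked over all 10-bit masks)
set_option maxRecDepth 20000 in
theorem coreFold : ∀ mask < 1024,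
    (List.foldl (fun valor t => if ¬ (t = true) then false else valor) true
      [Nat.testBit mask 0, Nat.testBit mask 1, Nat.testBit mask 2, Nat.testBit mask 3,
       Nat.testBit mask 4, Nat.testBit mask 5, Nat.testBit mask 6, Nat.testBit mask 7,
       Nat.testBit mask 8, Nat.testBit mask 9]) = (mask == 1023) := by decide

-- A's fold over the ten digit strings, given the membership ↔ mask-bit bridge
theorem coreA (s : List Char) (mask : Nat) (hmask : mask < 1024)
    (h : ∀ d, d < 10 → (decide (Nat.digitChar d ∈ s) = Nat.testBit mask d)) :
    (["0","1","2","3","4","5","6","7","8","9"].foldl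
        (fun valor f => if ¬ (PySem.Chars.isIn f.toList s = true) then false else valor) true)
      = (mask == 1023) := by
  have h0 := h 0 (by omega); have h1 := h 1 (by omega); have h2 := h 2 (by omega)
  have h3 := h 3 (by omega); have h4 := h 4 (by omega); have h5 := h 5 (by omega)
  have h6 := h 6 (by omega); have h7 := h 7 (by omega); have h8 := h 8 (by omega)
  have h9 := h 9 (by omega)
  simp only [show Nat.digitChar 0 = '0' from rfl, show Nat.digitChar 1 = '1' from rfl,
    show Nat.digitChar 2 = '2' from rfl, show Nat.digitChar 3 = '3' from rfl,
    show Nat.digitChar 4 = '4' from rfl, show Nat.digitChar 5 = '5' from rfl,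
    show Nat.digitChar 6 = '6' from rfl, show Nat.digitChar 7 = '7' from rfl,
    show Nat.digitChar 8 = '8' from rfl, show Nat.digitChar 9 = '9' from rfl]
      at h0 h1 h2 h3 h4 h5 h6 h7 h8 h9
  have hfold := coreFold mask hmask
  simp only [List.foldl] at hfold ⊢
  simp only [show ("0" : String).toList = ['0'] from rfl, show ("1" : String).toList = ['1'] from rfl,
    show ("2" : String).toList = ['2'] from rfl, show ("3" : String).toList = ['3'] from rfl,
    show ("4" : String).toList = ['4'] from rfl, show ("5" : String).toList = ['5'] from rfl,
    show ("6" : String).toList = ['6'] from rfl, show ("7" : String).toList = ['7'] from rfl,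
    show ("8" : String).toList = ['8'] from rfl, show ("9" : String).toList = ['9'] from rfl,
    isIn_singleton, h0, h1, h2, h3, h4, h5, h6, h7, h8, h9]
  exact hfold

theorem digitChar_ne_dash : ∀ d < 10, Nat.digitChar d ≠ '-' := by decide

-- ===== VERDICT (by name: the statement is the Claim_ definition above) =====
theorem espandigital_spec : Claim_equal_espandigital := by
  intro n _
  unfold Spec_espandigital
  by_cases h0 : n = 0
  · subst h0
    have hA : espandigital 0 = false := by decide
    have hB : espandigital_alt 0 = false := by
      unfold espandigital_alt
      rw [show (0 : Int).natAbs = 0 from rfl, maskLoop_zero]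
      decide
    rw [hA, hB]
  · have hpos : 0 < n.natAbs := Int.natAbs_pos.mpr h0
    have hmem : ∀ d, d < 10 →
        (Nat.digitChar d ∈ (PySem.Int.toStr n).toList ↔ Nat.digitChar d ∈ Nat.toDigits 10 n.natAbs) := by
      intro d hd
      rw [PySem.Int.toList_toStr]
      unfold PySem.Int.toChars
      by_cases hneg : n < 0
      · simp [hneg, digitChar_ne_dash d hd]
      · have hna : n.toNat = n.natAbs := by omega
        simp [hneg, hna]
    unfold espandigital espandigital_alt
    rw [rangemap_digits]
    have hbridge : ∀ d, d < 10 →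
        (decide (Nat.digitChar d ∈ (PySem.Int.toStr n).toList) = Nat.testBit (pvMaskLoop n.natAbs 0) d) := by
      intro d hd
      have hiff : (Nat.digitChar d ∈ (PySem.Int.toStr n).toList) ↔
          ((pvMaskLoop n.natAbs 0).testBit d = true) :=
        (hmem d hd).trans (memBit n.natAbs hpos d hd)
      have hb : (pvMaskLoop n.natAbs 0).testBit d
          = decide ((pvMaskLoop n.natAbs 0).testBit d = true) := by simp
      rw [hb, decide_eq_decide]
      exact hiff
    have := coreA (PySem.Int.toStr n).toList (pvMaskLoop n.natAbs 0) (maskLoop_lt _) hbridge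
    simpa [PySem.Str.isIn] using this
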